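-- pv_equiv track=rewrite | github.com/mrpep/Live-coding-with-jupyter | utils.py | recursive_get_duration
-- ===== SOURCE A (Python) =====
-- def split_by_val(seq,val):
--     split_idxs = [0]
--     for i,elem in enumerate(seq):
--         if elem == val and i != 0:
--             split_idxs.append(i)
--             if i+1 < len(seq) and seq[i+1] != val:
--                 split_idxs.append(i+1)
--     split_idxs.append(len(seq))
--
--     splits = [seq[i:j] for i,j in zip(split_idxs[:-1],split_idxs[1:])]
--
--     return splits
--
-- def recursive_get_duration(sequence, val, duration, p, q):
--     splits = split_by_val(sequence,val)
--     duration[p:q] = duration[p:q]*len(splits)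
--     for split in splits:
--         q = p + len(split)
--         if len(split) > 1:
--             duration = recursive_get_duration(split,val+1,duration,p,q)
--         p = q
--
--     return duration
-- ===== SOURCE B (Python) =====
-- def split_by_val(seq, val):
--     split_idxs = [0]
--     for i, elem in enumerate(seq):
--         if elem == val and i != 0:
--             split_idxs.append(i)
--             if i + 1 < len(seq) and seq[i + 1] != val:
--                 split_idxs.append(i + 1)
--     split_idxs.append(len(seq))
--     splits = [seq[i:j] for i, j in zip(split_idxs[:-1], split_idxs[1:])]
--     return splits
--
--
-- def recursive_get_duration(sequence, val, duration, p, q):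
--     # Explicit worklist instead of recursion: frames are (sequence, val, p, q);
--     # children are pushed in reverse so they are processed in the recursion's
--     # pre-order, which preserves the order of the slice assignments.
--     stack = [(sequence, val, p, q)]
--     while stack:
--         seq, v, p, q = stack.pop()
--         splits = split_by_val(seq, v)
--         duration[p:q] = duration[p:q] * len(splits)
--         children = []
--         for split in splits:
--             q = p + len(split)
--             if len(split) > 1:
--                 children.append((split, v + 1, p, q))
--             p = q
--         stack.extend(reversed(children))
--     return duration
-- ===== Notes on version B (the rewrite author's own statement) =====
-- stated objective: alternative
-- what changed: The recursion over splits is replaced by an explicit worklist of (sequence, val, p, q) frames, popped in pre-order (children pushed in reverse), performing the same slice assignments on the duration list iteratively.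
-- outside the precondition, e.g. on recursive_get_duration([0, 950], 0, [1, 2], 0, 2): A returns [1, 2, 1, 2], B returns [1, 2, 1, 2]
import Mathlib
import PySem

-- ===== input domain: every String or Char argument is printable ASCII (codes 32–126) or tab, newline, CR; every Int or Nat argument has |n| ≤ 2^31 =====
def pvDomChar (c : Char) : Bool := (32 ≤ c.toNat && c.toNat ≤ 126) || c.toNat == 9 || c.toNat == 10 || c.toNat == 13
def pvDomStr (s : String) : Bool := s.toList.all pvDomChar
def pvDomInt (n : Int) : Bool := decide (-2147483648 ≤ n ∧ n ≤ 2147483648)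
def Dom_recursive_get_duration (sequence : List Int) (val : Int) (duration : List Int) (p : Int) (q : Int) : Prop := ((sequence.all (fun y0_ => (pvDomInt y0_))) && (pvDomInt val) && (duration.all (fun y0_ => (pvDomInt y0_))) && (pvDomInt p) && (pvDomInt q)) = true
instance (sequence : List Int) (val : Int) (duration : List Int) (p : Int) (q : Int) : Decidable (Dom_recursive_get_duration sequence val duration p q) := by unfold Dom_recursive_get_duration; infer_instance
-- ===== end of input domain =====

-- B replaces A's recursion by an explicit pre-order worklist of (sequence, val, p, q) frames
-- (objective: alternative).  Both A and B mutate the caller's duration list in place in Python;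
-- the equivalence proved here is about the RETURN value only.

-- ===== PORT A =====
-- shared helper: Python slice assignment  l[p:q] = x  (step 1), ported by hand via
-- PySem.List.clampIdx (exact: Python resolves both bounds by clamping, then replaces
-- the region [a, max a b) by x).  Used identically by both Pythons.
def pySetSlice (l : List Int) (p q : Int) (x : List Int) : List Int :=
  let a := PySem.List.clampIdx l.length p
  let b := PySem.List.clampIdx l.length q
  l.take a ++ x ++ l.drop (max a b)

-- the body of split_by_val's for-loop over enumerate(seq), building split_idxs by appends
def sbvGo (s : List Int) (v : Int) : List (Int × Int) → List Int → List Int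
  | [], acc => acc
  | (i, elem) :: rest, acc =>
      sbvGo s v rest
        (if elem = v ∧ i ≠ 0 then
          (acc ++ [i]) ++
            (if i + 1 < PySem.List.len s ∧ PySem.List.pyGetD s (i + 1) 0 ≠ v then [i + 1] else [])
        else acc)

-- helper split_by_val, identical in both Pythons (ported once, used by both ports)
def split_by_val (s : List Int) (v : Int) : List (List Int) :=
  let idxs := sbvGo s v (PySem.List.enumerate s) [0] ++ [PySem.List.len s]
  ((PySem.List.slice idxs none (some (-1))).zip (PySem.List.slice idxs (some 1) none)).map
    (fun ij => PySem.List.slice s (some ij.1) (some ij.2))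

-- fuel bound: on inputs admitted by Pre_ this dominates the recursion depth (proved below);
-- the fuel is only a totality guard — it never changes the computed value on admitted inputs.
def Mfn (s : List Int) (v : Int) : Nat := s.length + (s.tail.foldl max v + 2 - v).toNat

def rgdA : Nat → List Int → Int → List Int → Int → Int → List Int
  | 0, _, _, dur, _, _ => dur
  | f + 1, s, v, dur, p, q =>
      let splits := split_by_val s v
      let dur1 := pySetSlice dur p q
        (PySem.List.pyRepeat (PySem.List.slice dur (some p) (some q)) (PySem.List.len splits))
      (splits.foldl
        (fun st sp =>
          let q' := st.1 + PySem.List.len sp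
          (q', if 1 < PySem.List.len sp then rgdA f sp (v + 1) st.2 st.1 q' else st.2))
        (p, dur1)).2

def recursive_get_duration (sequence : List Int) (val : Int) (duration : List Int) (p : Int) (q : Int) : List Int :=
  rgdA (Mfn sequence val) sequence val duration p q

-- ===== PORT B =====
-- the frame-collecting loop of B: walks the splits advancing p, keeping frames for len > 1
def mkFrames (v : Int) : List (List Int) → Int → List (List Int × Int × Int × Int)
  | [], _ => []
  | sp :: cs, p =>
      (if 1 < PySem.List.len sp then [(sp, v + 1, p, p + PySem.List.len sp)] else [])
        ++ mkFrames v cs (p + PySem.List.len sp)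

-- B's while-loop over the stack; children are pushed in reverse in Python so they pop
-- left-to-right — with the list head as top of stack that is exactly prepending in order.
-- The fuel is a totality guard only (it dominates the number of pops on admitted inputs).
def rgdB : Nat → List (List Int × Int × Int × Int) → List Int → List Int
  | 0, _, dur => dur
  | _ + 1, [], dur => dur
  | f + 1, (s, v, p, q) :: rest, dur =>
      let splits := split_by_val s v
      let dur1 := pySetSlice dur p q
        (PySem.List.pyRepeat (PySem.List.slice dur (some p) (some q)) (PySem.List.len splits))
      rgdB f (mkFrames v splits p ++ rest) dur1

def recursive_get_duration_alt (sequence : List Int) (val : Int) (duration : List Int) (p : Int) (q : Int) : List Int :=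
  rgdB ((Mfn sequence val + 1) ^ Mfn sequence val) [(sequence, val, p, q)] duration

-- ===== PRECONDITION & SPEC =====
-- Pre_ excludes exactly the inputs on which A raises RecursionError, slightly
-- over-approximated: a tail element below val whose two left neighbours cannot detach it
-- (first conjunct) makes A's level climb past every element and recurse forever in the
-- common case (some rarer such left contexts do let A return — see claim.json cites); and
-- a tail element more than 900 above val drives A's recursion depth to the order of
-- Python's recursion limit, where A raises (the small band in which A still returns when
-- called at the top of an empty stack is excluded with it, since the exact crossover
-- depends on the ambient call stack).
def Pre_recursive_get_duration (sequence : List Int) (val : Int) (duration : List Int) (p : Int) (q : Int) : Prop :=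
  (∀ j : Nat, j < sequence.length → 1 ≤ j → sequence.getD j 0 < val →
      (2 ≤ j ∧ val ≤ sequence.getD (j - 1) 0 ∧
        (sequence.getD (j - 1) 0 ≤ sequence.getD (j - 2) 0 ∨ sequence.getD (j - 2) 0 < val)))
  ∧ (∀ x ∈ sequence.tail, x ≤ val + 900)

instance (sequence : List Int) (val : Int) (duration : List Int) (p : Int) (q : Int) : Decidable (Pre_recursive_get_duration sequence val duration p q) := by unfold Pre_recursive_get_duration; infer_instance

def pvWitness_recursive_get_duration : List Int × Int × List Int × Int × Int :=
  ([9, 5, 0, 1, 2], 0, [5, 7, 3, 2, 9], 0, 5)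

def Spec_recursive_get_duration (sequence : List Int) (val : Int) (duration : List Int) (p : Int) (q : Int) (out : List Int) : Prop := out = recursive_get_duration_alt sequence val duration p q
instance (sequence : List Int) (val : Int) (duration : List Int) (p : Int) (q : Int) (out : List Int) : Decidable (Spec_recursive_get_duration sequence val duration p q out) := by unfold Spec_recursive_get_duration; infer_instance

-- ===== CLAIM (what is proved, stated in full; the proofs are below) =====
def Claim_equal_recursive_get_duration : Prop := ∀ (sequence : List Int) (val : Int) (duration : List Int) (p : Int) (q : Int), Dom_recursive_get_duration sequence val duration p q → Pre_recursive_get_duration sequence val duration p q → Spec_recursive_get_duration sequence val duration p q (recursive_get_duration sequence val duration p q)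

-- ===== LEMMAS AND PROOFS =====

-- the invariant carried through the recursion (= the first conjunct of Pre_, at level v):
-- every element below the current level has, two steps to its left, a context that will
-- split it off before the level passes its left neighbour
def Inv_rgd (s : List Int) (v : Int) : Prop :=
  ∀ j : Nat, j < s.length → 1 ≤ j → s.getD j 0 < v →
    (2 ≤ j ∧ v ≤ s.getD (j - 1) 0 ∧
      (s.getD (j - 1) 0 ≤ s.getD (j - 2) 0 ∨ s.getD (j - 2) 0 < v))

-- the per-node fuel bound of port B
def nuF (n : Nat) : Nat := (n + 1) ^ n

-- the split_idxs list of split_by_val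
def idxsOf (s : List Int) (v : Int) : List Int :=
  sbvGo s v (PySem.List.enumerate s) [0] ++ [PySem.List.len s]

lemma split_by_val_eq (s : List Int) (v : Int) :
    split_by_val s v =
      ((idxsOf s v).dropLast.zip (idxsOf s v).tail).map
        (fun ij => PySem.List.slice s (some ij.1) (some ij.2)) := by
  simp only [split_by_val, idxsOf, PySem.List.slice_to_neg_one, PySem.List.slice_from_one]

lemma foldl_max_shift (t : List Int) : ∀ a b : Int, t.foldl max (max a b) = max a (t.foldl max b) := by
  induction t with
  | nil => intro a b; simp
  | cons x t ih =>
      intro a b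
      simp only [List.foldl_cons]
      rw [max_assoc, ih]

lemma foldl_max_le (t : List Int) : ∀ a B : Int, a ≤ B → (∀ x ∈ t, x ≤ B) → t.foldl max a ≤ B := by
  induction t with
  | nil => intro a B h _; simpa using h
  | cons x t ih =>
      intro a B ha hx
      simp only [List.foldl_cons]
      exact ih _ _ (max_le ha (hx x (by simp))) (fun y hy => hx y (by simp [hy]))

lemma sbvGo_acc (s : List Int) (v : Int) :
    ∀ (es : List (Int × Int)) (acc : List Int), sbvGo s v es acc = acc ++ sbvGo s v es [] := by
  intro es
  induction es with
  | nil => intro acc; simp [sbvGo]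
  | cons e rest ih =>
      intro acc
      obtain ⟨i, elem⟩ := e
      simp only [sbvGo]
      rw [ih]
      conv_rhs => rw [ih]
      by_cases h : elem = v ∧ i ≠ 0 <;> simp [h]

lemma sbvGo_inv (s : List Int) (v : Int) :
    ∀ (t : List Int) (k : Nat) (acc : List Int),
      s.drop k = t →
      (∀ x ∈ acc, 0 ≤ x ∧ (x = 0 ∨ (1 ≤ x ∧ x < (s.length : Int)))) →
      acc.Pairwise (· < ·) →
      (∀ x ∈ acc, x < (k : Int) ∨ (x = (k : Int) ∧ (k = 0 ∨ s.getD k 0 ≠ v))) →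
      (∀ m : Nat, 1 ≤ m → m < k → s.getD m 0 = v → ((m : Int) ∈ acc)) →
      (∀ m : Nat, 1 ≤ m → m < k → s.getD m 0 = v → m + 1 < s.length → s.getD (m + 1) 0 ≠ v →
        (((m + 1 : Nat) : Int) ∈ acc)) →
      (∀ x ∈ acc, x = 0 ∨ ∃ m : Nat, x = (m : Int) ∧ 1 ≤ m ∧ m < s.length ∧
        (s.getD m 0 = v ∨ (2 ≤ m ∧ s.getD (m - 1) 0 = v ∧ s.getD m 0 ≠ v))) →
      (∀ x ∈ sbvGo s v (PySem.List.enumerate t (k : Int)) acc, 0 ≤ x ∧ (x = 0 ∨ (1 ≤ x ∧ x < (s.length : Int)))) ∧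
        (sbvGo s v (PySem.List.enumerate t (k : Int)) acc).Pairwise (· < ·) ∧
        (∀ m : Nat, 1 ≤ m → m < s.length → s.getD m 0 = v →
          ((m : Int) ∈ sbvGo s v (PySem.List.enumerate t (k : Int)) acc)) ∧
        (∀ m : Nat, 1 ≤ m → m < s.length → s.getD m 0 = v → m + 1 < s.length → s.getD (m + 1) 0 ≠ v →
          (((m + 1 : Nat) : Int) ∈ sbvGo s v (PySem.List.enumerate t (k : Int)) acc)) ∧
        (∀ x ∈ sbvGo s v (PySem.List.enumerate t (k : Int)) acc, x = 0 ∨ ∃ m : Nat, x = (m : Int) ∧ 1 ≤ m ∧ m < s.length ∧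
          (s.getD m 0 = v ∨ (2 ≤ m ∧ s.getD (m - 1) 0 = v ∧ s.getD m 0 ≠ v))) := by
  intro t
  induction t with
  | nil =>
      intro k acc hdrop h1 h2 h3 h4 h5 h6
      have hlen : s.length ≤ k := by
        by_contra hc
        have : s.drop k ≠ [] := by
          intro he
          rw [List.drop_eq_nil_iff] at he
          omega
        exact this hdrop
      simp only [PySem.List.enumerate_nil, sbvGo]
      exact ⟨h1, h2, fun m hm1 hm2 hm3 => h4 m hm1 (by omega) hm3,
        fun m hm1 hm2 hm3 hm4 hm5 => h5 m hm1 (by omega) hm3 hm4 hm5, h6⟩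
  | cons x t ih =>
      intro k acc hdrop h1 h2 h3 h4 h5 h6
      have hk : k < s.length := by
        by_contra hc
        rw [List.drop_eq_nil_of_le (by omega)] at hdrop
        exact absurd hdrop (by simp)
      have hx : s[k] = x := by
        have h0 : (s.drop k)[0]'(by rw [hdrop]; simp) = x := by
          simp [hdrop]
        rw [List.getElem_drop] at h0
        simpa using h0
      have hdrop' : s.drop (k + 1) = t := by
        have : (s.drop k).drop 1 = s.drop (k + 1) := by
          rw [List.drop_drop]
        rw [← this, hdrop]
        simp
      have hgetD : s.getD k 0 = x := by
        rw [List.getD_eq_getElem s 0 hk, hx]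
      rw [PySem.List.enumerate_cons]
      simp only [sbvGo]
      have hcast : (k : Int) + 1 = ((k + 1 : Nat) : Int) := by push_cast; ring
      by_cases hb : x = v ∧ (k : Int) ≠ 0
      · have hknz : k ≠ 0 := by
          intro h0; apply hb.2; simp [h0]
        have holdlt : ∀ y ∈ acc, y < (k : Int) := by
          intro y hy
          rcases h3 y hy with h | ⟨_, h⟩
          · exact h
          · rcases h with h | h
            · exact absurd h hknz
            · exact absurd (hgetD.trans hb.1) h
        rw [if_pos hb]
        by_cases hin : (k : Int) + 1 < PySem.List.len s ∧ PySem.List.pyGetD s ((k : Int) + 1) 0 ≠ v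
        · have hk1 : k + 1 < s.length := by
            have := hin.1
            rw [PySem.List.len_eq] at this
            exact_mod_cast this
          have hget1 : s.getD (k + 1) 0 ≠ v := by
            have := hin.2
            rw [hcast, PySem.List.pyGetD_natCast] at this
            exact this
          rw [if_pos hin]
          rw [hcast]
          apply ih (k + 1) _ hdrop'
          · intro y hy
            simp only [List.append_assoc, List.mem_append, List.mem_singleton] at hy
            rcases hy with hy | hy | hy
            · exact h1 y hy
            · subst hy
              constructor
              · positivity
              · right; constructor
                · exact_mod_cast Nat.one_le_iff_ne_zero.mpr hknz
                · exact_mod_cast hk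
            · subst hy
              constructor
              · positivity
              · right; constructor
                · push_cast; omega
                · push_cast; exact_mod_cast hk1
          · rw [List.append_assoc]
            rw [List.pairwise_append]
            refine ⟨h2, ?_, ?_⟩
            · simp only [List.cons_append, List.nil_append]
              constructor
              · intro y hy
                simp at hy
                subst hy
                omega
              · simp
            · intro y hy z hz
              simp only [List.cons_append, List.nil_append, List.mem_cons] at hz
              have := holdlt y hy
              rcases hz with hz | hz | hz
              · omega
              · simp at hz; omega
              · simp at hz
          · intro y hy
            simp only [List.append_assoc, List.mem_append, List.mem_singleton] at hy
            rcases hy with hy | hy | hy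
            · left; have := holdlt y hy; push_cast; omega
            · subst hy; left; push_cast; omega
            · subst hy; right
              constructor
              · push_cast; ring
              · right; exact hget1
          · intro m hm1 hm2 hm3
            by_cases hmk : m < k
            · have := h4 m hm1 hmk hm3
              simp only [List.append_assoc, List.mem_append]
              left; exact this
            · have : m = k := by omega
              subst this
              simp
          · intro m hm1 hm2 hm3 hm4 hm5
            by_cases hmk : m < k
            · have := h5 m hm1 hmk hm3 hm4 hm5
              simp only [List.append_assoc, List.mem_append]
              left; exact this
            · have : m = k := by omega
              subst this
              rw [← hcast]
              simp
          · intro y hy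
            simp only [List.append_assoc, List.mem_append, List.mem_singleton] at hy
            rcases hy with hy | hy | hy
            · exact h6 y hy
            · subst hy; right
              exact ⟨k, rfl, by omega, hk, Or.inl (hgetD.trans hb.1)⟩
            · subst hy; right
              refine ⟨k + 1, by push_cast; ring, by omega, hk1, Or.inr ⟨by omega, ?_, hget1⟩⟩
              simpa using hgetD.trans hb.1
        · rw [if_neg hin]
          rw [hcast]
          apply ih (k + 1) _ hdrop'
          · intro y hy
            simp only [List.mem_append, List.mem_singleton, List.append_nil] at hy
            rcases hy with hy | hy
            · exact h1 y hy
            · subst hy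
              constructor
              · positivity
              · right; constructor
                · exact_mod_cast Nat.one_le_iff_ne_zero.mpr hknz
                · exact_mod_cast hk
          · simp only [List.append_nil]
            rw [List.pairwise_append]
            refine ⟨h2, by simp, ?_⟩
            intro y hy z hz
            simp only [List.mem_singleton] at hz
            subst hz
            exact holdlt y hy
          · intro y hy
            simp only [List.mem_append, List.mem_singleton, List.append_nil] at hy
            rcases hy with hy | hy
            · left; have := holdlt y hy; push_cast; omega
            · subst hy; left; push_cast; omega
          · intro m hm1 hm2 hm3
            by_cases hmk : m < k
            · have := h4 m hm1 hmk hm3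
              simp only [List.mem_append, List.append_nil]
              left; exact this
            · have : m = k := by omega
              subst this
              simp
          · intro m hm1 hm2 hm3 hm4 hm5
            by_cases hmk : m < k
            · have := h5 m hm1 hmk hm3 hm4 hm5
              simp only [List.mem_append, List.append_nil]
              left; exact this
            · have hmke : m = k := by omega
              subst hmke
              exfalso
              apply hin
              constructor
              · rw [PySem.List.len_eq]; exact_mod_cast hm4
              · rw [hcast, PySem.List.pyGetD_natCast]; exact hm5
          · intro y hy
            simp only [List.mem_append, List.mem_singleton, List.append_nil] at hy
            rcases hy with hy | hy
            · exact h6 y hy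
            · subst hy; right
              exact ⟨k, rfl, by omega, hk, Or.inl (hgetD.trans hb.1)⟩
      · rw [if_neg hb]
        rw [hcast]
        apply ih (k + 1) _ hdrop' h1 h2
        · intro y hy
          rcases h3 y hy with h | ⟨h, _⟩
          · left; push_cast; omega
          · left; push_cast; omega
        · intro m hm1 hm2 hm3
          by_cases hmk : m < k
          · exact h4 m hm1 hmk hm3
          · have hmke : m = k := by omega
            subst hmke
            exfalso
            apply hb
            constructor
            · rw [← hgetD]; exact hm3
            · have hkpos : 0 < m := by omega
              have hcast2 : (0 : Int) < (m : Int) := by exact_mod_cast hkpos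
              omega
        · intro m hm1 hm2 hm3 hm4 hm5
          by_cases hmk : m < k
          · exact h5 m hm1 hmk hm3 hm4 hm5
          · have hmke : m = k := by omega
            subst hmke
            exfalso
            apply hb
            constructor
            · rw [← hgetD]; exact hm3
            · have hkpos : 0 < m := by omega
              have hcast2 : (0 : Int) < (m : Int) := by exact_mod_cast hkpos
              omega
        · exact h6

lemma idxs_shape (s : List Int) (v : Int) :
    ∃ r, idxsOf s v = 0 :: r := by
  refine ⟨sbvGo s v (PySem.List.enumerate s) [] ++ [PySem.List.len s], ?_⟩
  unfold idxsOf
  rw [sbvGo_acc]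
  simp

lemma idxs_props (s : List Int) (v : Int) :
    (∀ x ∈ idxsOf s v, 0 ≤ x ∧ x ≤ (s.length : Int)) ∧
      (s ≠ [] → (idxsOf s v).Pairwise (· < ·)) ∧
      (∀ m : Nat, 1 ≤ m → m < s.length → s.getD m 0 = v → ((m : Int) ∈ idxsOf s v)) ∧
      (∀ m : Nat, 1 ≤ m → m < s.length → s.getD m 0 = v → m + 1 < s.length → s.getD (m + 1) 0 ≠ v →
        (((m + 1 : Nat) : Int) ∈ idxsOf s v)) ∧
      (∀ x ∈ idxsOf s v, x = 0 ∨ x = (s.length : Int) ∨ ∃ m : Nat, x = (m : Int) ∧ 1 ≤ m ∧ m < s.length ∧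
        (s.getD m 0 = v ∨ (2 ≤ m ∧ s.getD (m - 1) 0 = v ∧ s.getD m 0 ≠ v))) := by
  have H := sbvGo_inv s v s 0 [0] (by simp) (by simp)
    (by simp) (by intro x hx; simp at hx; subst hx; simp) (by intro m h1 h2; omega)
    (by intro m h1 h2; omega)
    (by intro x hx; simp at hx; subst hx; left; rfl)
  have hcast0 : ((0 : Nat) : Int) = 0 := by simp
  rw [hcast0] at H
  obtain ⟨H1, H2, H3, H4, H5⟩ := H
  refine ⟨?_, ?_, ?_, ?_, ?_⟩
  · intro x hx
    unfold idxsOf at hx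
    rcases List.mem_append.mp hx with h | h
    · obtain ⟨ha, hb⟩ := H1 x h
      constructor
      · exact ha
      · rcases hb with hb | ⟨_, hb⟩ <;> omega
    · simp at h
      subst h
      simp
  · intro hs
    unfold idxsOf
    rw [List.pairwise_append]
    refine ⟨H2, by simp, ?_⟩
    intro a ha b hb
    simp only [List.mem_singleton] at hb
    subst hb
    obtain ⟨h0, hc⟩ := H1 a ha
    have hpos : 0 < s.length := List.length_pos_iff.mpr hs
    rcases hc with hc | ⟨_, hc⟩ <;> simp [PySem.List.len_eq] <;> omega
  · intro m h1 h2 h3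
    unfold idxsOf
    exact List.mem_append.mpr (Or.inl (H3 m h1 h2 h3))
  · intro m h1 h2 h3 h4 h5
    unfold idxsOf
    exact List.mem_append.mpr (Or.inl (H4 m h1 h2 h3 h4 h5))
  · intro x hx
    unfold idxsOf at hx
    rcases List.mem_append.mp hx with h | h
    · rcases H5 x h with h0 | hm
      · exact Or.inl h0
      · exact Or.inr (Or.inr hm)
    · simp [PySem.List.len_eq] at h
      exact Or.inr (Or.inl (by exact_mod_cast h))

lemma zip_consec {l : List Int} {a b : Int} (h : (a, b) ∈ l.dropLast.zip l.tail) :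
    ∃ j, ∃ hj : j + 1 < l.length, l[j] = a ∧ l[j + 1] = b := by
  rw [List.mem_iff_getElem] at h
  obtain ⟨j, hj, hget⟩ := h
  have hjl : j + 1 < l.length := by
    have := hj
    simp [List.length_zip, List.length_dropLast, List.length_tail] at this
    omega
  refine ⟨j, hjl, ?_, ?_⟩
  · have h1 := List.getElem_zip (l := l.dropLast) (l' := l.tail) (i := j) (h := hj)
    rw [h1] at hget
    have := congrArg Prod.fst hget
    simp only at this
    rw [← this, List.getElem_dropLast]
  · have h1 := List.getElem_zip (l := l.dropLast) (l' := l.tail) (i := j) (h := hj)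
    rw [h1] at hget
    have := congrArg Prod.snd hget
    simp only at this
    rw [← this, List.getElem_tail]

lemma consec_no_between {l : List Int} (hpw : l.Pairwise (· < ·)) {j : Nat}
    (hj : j + 1 < l.length) {t : Int} (ht : t ∈ l) : ¬(l[j] < t ∧ t < l[j + 1]) := by
  rintro ⟨h1, h2⟩
  obtain ⟨i, hi, rfl⟩ := List.mem_iff_getElem.mp ht
  have hP := List.pairwise_iff_getElem.mp hpw
  rcases Nat.lt_or_ge i (j + 1) with h | h
  · rcases Nat.eq_or_lt_of_le (by omega : i ≤ j) with he | hlt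
    · subst he; omega
    · have := hP i j hi (by omega) hlt
      omega
  · rcases Nat.eq_or_lt_of_le h with he | hlt
    · subst he
      exact lt_irrefl _ h2
    · have := hP (j + 1) i hj hi hlt
      omega

lemma strict_sorted_le_getElem {l : List Int} (hs : l.Pairwise (· < ·))
    (h0 : ∀ x ∈ l, 0 ≤ x) : ∀ i (hi : i < l.length), (i : Int) ≤ l[i] := by
  intro i
  induction i with
  | zero => intro hi; simpa using h0 l[0] (List.getElem_mem hi)
  | succ i ih =>
      intro hi
      have h1 : l[i] < l[i+1] := by
        rw [List.pairwise_iff_getElem] at hs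
        exact hs i (i+1) (by omega) hi (by omega)
      have := ih (by omega)
      push_cast
      omega

lemma length_split_by_val (s : List Int) (v : Int) :
    (split_by_val s v).length = (idxsOf s v).length - 1 := by
  rw [split_by_val_eq]
  simp [List.length_zip, List.length_dropLast, List.length_tail]

lemma split_by_val_nil (v : Int) : split_by_val [] v = [[]] := by
  rfl

lemma split_master {s : List Int} {v : Int} (hs : s ≠ []) :
    ∀ c ∈ split_by_val s v, ∃ a b : Nat,
      a < b ∧ b ≤ s.length ∧ c = (s.drop a).take (b - a) ∧
      (∀ m : Nat, a < m → m < b → s.getD m 0 ≠ v) ∧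
      (2 ≤ (split_by_val s v).length → b - a < s.length) ∧
      (a = 0 ∨ (1 ≤ a ∧ s.getD a 0 = v ∧ b = a + 1) ∨
        (2 ≤ a ∧ s.getD (a - 1) 0 = v ∧ s.getD a 0 ≠ v)) := by
  intro c hc
  rw [split_by_val_eq] at hc
  obtain ⟨ij, hij, hcs⟩ := List.mem_map.mp hc
  obtain ⟨a', b'⟩ := ij
  obtain ⟨j, hj, hja, hjb⟩ := zip_consec hij
  obtain ⟨P1, P2, P3, P4, P5⟩ := idxs_props s v
  have hpw := P2 hs
  have ha'0 : 0 ≤ a' := (P1 _ (hja ▸ List.getElem_mem _)).1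
  have hb'0 : 0 ≤ b' := (P1 _ (hjb ▸ List.getElem_mem _)).1
  have hb'len : b' ≤ (s.length : Int) := (P1 _ (hjb ▸ List.getElem_mem _)).2
  have hab : a' < b' := by
    rw [← hja, ← hjb]
    exact List.pairwise_iff_getElem.mp hpw j (j+1) (by omega) hj (by omega)
  have ha'len : a' < (s.length : Int) := by omega
  have hnb : ∀ t ∈ idxsOf s v, ¬(a' < t ∧ t < b') := by
    intro t ht
    have := consec_no_between hpw hj ht
    rw [hja, hjb] at this
    exact this
  have hmem_len : ((s.length : Nat) : Int) ∈ idxsOf s v := by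
    unfold idxsOf
    refine List.mem_append.mpr (Or.inr ?_)
    simp [PySem.List.len_eq]
  refine ⟨a'.toNat, b'.toNat, by omega, by omega, ?_, ?_, ?_, ?_⟩
  · rw [← hcs]
    exact PySem.List.slice_toNat s ha'0 hb'0
  · intro m hma hmb hv
    have hm1 : 1 ≤ m := by omega
    have hmlen : m < s.length := by omega
    have hmem : ((m : Int)) ∈ idxsOf s v := P3 m hm1 hmlen hv
    exact absurd ⟨by omega, by omega⟩ (hnb _ hmem)
  · intro h2
    by_contra hge
    have hba : b'.toNat - a'.toNat ≥ s.length := by omega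
    have ha0 : a' = 0 := by omega
    have hb0 : b' = (s.length : Int) := by omega
    obtain ⟨r, hr⟩ := idxs_shape s v
    have hL0 : (idxsOf s v)[0]'(by rw [hr]; simp) = 0 := by simp [hr]
    have hj0 : j = 0 := by
      by_contra hj0
      have := List.pairwise_iff_getElem.mp hpw 0 j (by omega) (by omega) (by omega)
      rw [hL0, hja, ha0] at this
      omega
    have hlen3 : 3 ≤ (idxsOf s v).length := by
      have := length_split_by_val s v
      omega
    have hgt := List.pairwise_iff_getElem.mp hpw (j+1) 2 (by omega) (by omega) (by omega)
    rw [hjb, hb0] at hgt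
    have := (P1 _ (List.getElem_mem (by omega : 2 < (idxsOf s v).length))).2
    omega
  · -- classification of the left boundary a'
    have hamem : a' ∈ idxsOf s v := hja ▸ List.getElem_mem _
    rcases P5 a' hamem with h0 | hL | ⟨m, hme, hm1, hmlen, hcase⟩
    · left; omega
    · omega
    · have hma : m = a'.toNat := by omega
      subst hma
      rcases hcase with hmv | ⟨hm2, hmv, hmne⟩
      · -- s[a] = v: show b = a + 1 using membership of a+1
        right; left
        refine ⟨by omega, hmv, ?_⟩
        have hsucc : (((a'.toNat + 1 : Nat)) : Int) ∈ idxsOf s v := by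
          rcases Nat.lt_or_ge (a'.toNat + 1) s.length with hlt | hge
          · by_cases hnv : s.getD (a'.toNat + 1) 0 = v
            · exact P3 (a'.toNat + 1) (by omega) hlt hnv
            · exact P4 a'.toNat (by omega) (by omega) hmv hlt hnv
          · have he : a'.toNat + 1 = s.length := by omega
            rw [he]
            exact hmem_len
        have := hnb _ hsucc
        omega
      · right; right
        exact ⟨hm2, hmv, hmne⟩

lemma seg_len {s : List Int} {a b : Nat} (hb : b ≤ s.length) :
    ((s.drop a).take (b - a)).length = b - a := by
  simp only [List.length_take, List.length_drop]
  omega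

lemma seg_getD {s : List Int} {a b : Nat} (hb : b ≤ s.length) {p : Nat} (hp : p < b - a) :
    ((s.drop a).take (b - a)).getD p 0 = s.getD (a + p) 0 := by
  have h1 : p < ((s.drop a).take (b - a)).length := by rw [seg_len hb]; exact hp
  rw [List.getD_eq_getElem _ _ h1, List.getD_eq_getElem _ _ (by omega : a + p < s.length)]
  simp [List.getElem_take, List.getElem_drop]

lemma split_singleton {s : List Int} {v : Int} (h : (split_by_val s v).length = 1) :
    split_by_val s v = [s] := by
  have hlen := length_split_by_val s v
  have hacc := sbvGo_acc s v (PySem.List.enumerate s) [0]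
  have hL : idxsOf s v = ([0] ++ sbvGo s v (PySem.List.enumerate s) []) ++ [PySem.List.len s] := by
    unfold idxsOf
    rw [hacc]
  have hLlen : (idxsOf s v).length = 2 := by omega
  have hC : sbvGo s v (PySem.List.enumerate s) [] = [] := by
    have := congrArg List.length hL
    simp at this
    have hnil : (sbvGo s v (PySem.List.enumerate s) []).length = 0 := by omega
    exact List.length_eq_zero_iff.mp hnil
  have hL2 : idxsOf s v = [0, PySem.List.len s] := by
    rw [hL, hC]
    rfl
  rw [split_by_val_eq, hL2]
  simp only [List.dropLast, List.tail, List.zip, List.zipWith, List.map]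
  congr 1
  have : PySem.List.len s = ((s.length : Nat) : Int) := by simp [PySem.List.len_eq]
  rw [this, PySem.List.slice_toNat s (by omega) (by positivity)]
  simp

lemma split_length_le {s : List Int} {v : Int} (hs : s ≠ []) :
    (split_by_val s v).length ≤ s.length := by
  obtain ⟨r, hr⟩ := idxs_shape s v
  obtain ⟨P1, P2, _, _, _⟩ := idxs_props s v
  have hpw := P2 hs
  have hpos : 0 < (idxsOf s v).length := by rw [hr]; simp
  have hlast := strict_sorted_le_getElem hpw (fun x hx => (P1 x hx).1)
    ((idxsOf s v).length - 1) (by omega)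
  have hle := (P1 _ (List.getElem_mem (by omega : (idxsOf s v).length - 1 < (idxsOf s v).length))).2
  have hlen := length_split_by_val s v
  have hfin : (((idxsOf s v).length - 1 : Nat) : Int) ≤ (s.length : Int) := le_trans hlast hle
  have hfin' : (idxsOf s v).length - 1 ≤ s.length := by exact_mod_cast hfin
  omega

lemma split_tail {s : List Int} {v : Int} {c : List Int} (hs : s ≠ [])
    (hc : c ∈ split_by_val s v) : ∀ x ∈ c.tail, x ∈ s.tail ∧ x ≠ v := by
  intro x hx
  obtain ⟨a, b, hab, hblen, hceq, hnov, _, _⟩ := split_master hs c hc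
  obtain ⟨i, hi, hxi⟩ := List.mem_iff_getElem.mp hx
  have hclen : c.length ≤ b - a := by
    rw [hceq]
    simp
  have htl : c.tail.length = c.length - 1 := by simp
  have hmb : a + (i + 1) < b := by omega
  have hmlen : a + (i + 1) < s.length := by omega
  have hxm : x = s[a + (i + 1)]'hmlen := by
    rw [← hxi, List.getElem_tail]
    subst hceq
    simp [List.getElem_take, List.getElem_drop]
  constructor
  · rw [List.mem_iff_getElem]
    refine ⟨a + i, ?_, ?_⟩
    · simp
      omega
    · rw [List.getElem_tail, hxm]
      simp [Nat.add_assoc]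
  · have h2 := hnov (a + (i + 1)) (by omega) hmb
    rw [List.getD_eq_getElem s 0 hmlen] at h2
    rw [hxm]
    exact h2

lemma Inv_rgd_child {s : List Int} {v : Int} {c : List Int} (hInv : Inv_rgd s v)
    (hc : c ∈ split_by_val s v) (hclen2 : 1 < c.length) : Inv_rgd c (v + 1) := by
  by_cases hs : s = []
  · subst hs
    rw [split_by_val_nil] at hc
    simp at hc
    subst hc
    simp at hclen2
  · obtain ⟨a, b, hab, hble, hceq, hnov, _, hhead⟩ := split_master hs c hc
    have hcl : c.length = b - a := by rw [hceq]; exact seg_len hble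
    intro p hp h1p hpv
    have hpb : a + p < b := by omega
    have hgp : c.getD p 0 = s.getD (a + p) 0 := by
      rw [hceq]; exact seg_getD hble (by omega)
    have hne : s.getD (a + p) 0 ≠ v := hnov (a + p) (by omega) hpb
    have hlt : s.getD (a + p) 0 < v := by rw [hgp] at hpv; omega
    obtain ⟨h2j, hlft, hthird⟩ := hInv (a + p) (by omega) (by omega) hlt
    have hp2 : 2 ≤ p := by
      by_contra hcon
      have hp1 : p = 1 := by omega
      subst hp1
      rcases hhead with h0 | ⟨h1a, hav, hb1⟩ | ⟨h2a, hprev, hane⟩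
      · omega
      · omega
      · have e1 : a + 1 - 1 = a := by omega
        have e2 : a + 1 - 2 = a - 1 := by omega
        rw [e1] at hlft
        rw [e1, e2] at hthird
        rcases hthird with h | h
        · rw [hprev] at h; omega
        · rw [hprev] at h; omega
    refine ⟨hp2, ?_, ?_⟩
    · have hg1 : c.getD (p - 1) 0 = s.getD (a + (p - 1)) 0 := by
        rw [hceq]; exact seg_getD hble (by omega)
      have e1 : a + p - 1 = a + (p - 1) := by omega
      rw [e1] at hlft
      have hne1 : s.getD (a + (p - 1)) 0 ≠ v := hnov (a + (p - 1)) (by omega) (by omega)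
      rw [hg1]
      omega
    · have hg1 : c.getD (p - 1) 0 = s.getD (a + (p - 1)) 0 := by
        rw [hceq]; exact seg_getD hble (by omega)
      have hg2 : c.getD (p - 2) 0 = s.getD (a + (p - 2)) 0 := by
        rw [hceq]; exact seg_getD hble (by omega)
      have e1 : a + p - 1 = a + (p - 1) := by omega
      have e2 : a + p - 2 = a + (p - 2) := by omega
      rw [e1, e2] at hthird
      rw [hg1, hg2]
      rcases hthird with h | h
      · exact Or.inl h
      · exact Or.inr (by omega)

lemma Mfn_ge2 (s : List Int) (v : Int) : 2 ≤ Mfn s v := by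
  unfold Mfn
  have h := (PySem.List.le_foldl_max s.tail v).1
  omega

lemma M_child {s : List Int} {v : Int} {c : List Int} (hInv : Inv_rgd s v)
    (hc : c ∈ split_by_val s v) (hlen : 1 < c.length) : Mfn c (v + 1) < Mfn s v := by
  have hs : s ≠ [] := by
    intro h
    subst h
    rw [split_by_val_nil] at hc
    simp at hc
    subst hc
    simp at hlen
  have hTlb := (PySem.List.le_foldl_max s.tail v).1
  have hTub := (PySem.List.le_foldl_max s.tail v).2
  have hTclb := (PySem.List.le_foldl_max c.tail (v + 1)).1
  have hTc : c.tail.foldl max (v + 1) ≤ max (s.tail.foldl max v) (v + 1) := by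
    apply foldl_max_le
    · exact le_max_right _ _
    · intro y hy
      exact le_trans (hTub y (split_tail hs hc y hy).1) (le_max_left _ _)
  rcases Nat.lt_or_ge (split_by_val s v).length 2 with h2 | h2
  · have h1 : (split_by_val s v).length = 1 := by
      have : split_by_val s v ≠ [] := List.ne_nil_of_mem hc
      have := List.length_pos_iff.mpr this
      omega
    have hcs : c = s := by
      have := split_singleton h1
      rw [this] at hc
      simpa using hc
    subst hcs
    obtain ⟨a, b, hab, hble, hceq, hnov, _, _⟩ := split_master hs c hc
    have hcl : c.length = b - a := by
      conv_lhs => rw [hceq]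
      exact seg_len hble
    have ha0 : a = 0 ∧ b = c.length := by omega
    have hl1 : 1 < c.length := hlen
    have hx_ne : c.getD 1 0 ≠ v := by
      have := hnov 1 (by omega) (by omega)
      exact this
    by_cases hxlt : c.getD 1 0 < v
    · exfalso
      obtain ⟨hj, _, _⟩ := hInv 1 hl1 le_rfl hxlt
      omega
    · have hxmem : c.getD 1 0 ∈ c.tail := by
        have h0 : 0 < c.tail.length := by simp; omega
        have hm : c.tail[0]'h0 ∈ c.tail := List.getElem_mem _
        have he : c.tail[0]'h0 = c.getD 1 0 := by
          rw [List.getD_eq_getElem _ _ hl1, List.getElem_tail]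
        rw [← he]
        exact hm
      have hT1 : v + 1 ≤ c.tail.foldl max v := le_trans (by omega) (hTub _ hxmem)
      have hshift : c.tail.foldl max (v + 1) = c.tail.foldl max v := by
        have hmax : (v + 1 : Int) = max (v + 1) v := by omega
        rw [hmax, foldl_max_shift]
        omega
      unfold Mfn
      rw [hshift]
      omega
  · obtain ⟨a, b, hab, hble, hceq, hnov, hlt, _⟩ := split_master hs c hc
    have hcl : c.length = b - a := by rw [hceq]; exact seg_len hble
    have hlt' := hlt h2
    have hclen : c.length < s.length := by omega
    unfold Mfn
    rcases le_or_gt (v + 1) (s.tail.foldl max v) with h | h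
    · have hTc' : c.tail.foldl max (v + 1) ≤ s.tail.foldl max v := by
        rw [max_eq_left h] at hTc
        exact hTc
      omega
    · have hTv : s.tail.foldl max v = v := by omega
      have hTc' : c.tail.foldl max (v + 1) ≤ v + 1 := by
        rw [hTv, max_eq_right (by omega)] at hTc
        exact hTc
      omega

lemma mem_mkFrames {v : Int} : ∀ (cs : List (List Int)) (p : Int) fr,
    fr ∈ mkFrames v cs p → fr.1 ∈ cs ∧ fr.2.1 = v + 1 ∧ 1 < fr.1.length := by
  intro cs
  induction cs with
  | nil => intro p fr h; simp [mkFrames] at h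
  | cons sp cs ih =>
      intro p fr h
      simp only [mkFrames, List.mem_append] at h
      by_cases hl : 1 < sp.length
      · simp [hl] at h
        rcases h with h | h
        · subst h
          exact ⟨by simp, rfl, hl⟩
        · obtain ⟨h1, h2, h3⟩ := ih _ _ h
          exact ⟨by simp [h1], h2, h3⟩
      · simp [hl] at h
        obtain ⟨h1, h2, h3⟩ := ih _ _ h
        exact ⟨by simp [h1], h2, h3⟩

lemma length_mkFrames {v : Int} : ∀ (cs : List (List Int)) (p : Int),
    (mkFrames v cs p).length ≤ cs.length := by
  intro cs
  induction cs with
  | nil => intro p; simp [mkFrames]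
  | cons sp cs ih =>
      intro p
      simp only [mkFrames, List.length_append]
      have hrec := ih (p + PySem.List.len sp)
      simp only [PySem.List.len_eq] at hrec
      by_cases hl : 1 < sp.length <;> simp [hl] <;> omega

lemma nuF_mono {a b : Nat} (h : a ≤ b) : nuF a ≤ nuF b := by
  unfold nuF
  calc (a+1)^a ≤ (b+1)^a := Nat.pow_le_pow_left (by omega) a
    _ ≤ (b+1)^b := Nat.pow_le_pow_right (by omega) h

lemma nu_rec {s : List Int} {v : Int} (p : Int) (hInv : Inv_rgd s v) :
    1 + ((mkFrames v (split_by_val s v) p).map (fun fr => nuF (Mfn fr.1 fr.2.1))).sum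
      ≤ nuF (Mfn s v) := by
  by_cases hs : s = []
  · subst hs
    rw [split_by_val_nil]
    have : mkFrames v [([] : List Int)] p = [] := by simp [mkFrames]
    rw [this]
    simp only [List.map_nil, List.sum_nil, Nat.add_zero]
    unfold nuF
    exact Nat.one_le_pow _ _ (by omega)
  · have hM2 := Mfn_ge2 s v
    have htoNat : 2 ≤ (s.tail.foldl max v + 2 - v).toNat := by
      have := (PySem.List.le_foldl_max s.tail v).1
      omega
    have hslen : s.length ≤ Mfn s v - 2 := by
      unfold Mfn
      omega
    have hbound : ∀ fr ∈ mkFrames v (split_by_val s v) p, nuF (Mfn fr.1 fr.2.1) ≤ Mfn s v ^ (Mfn s v - 1) := by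
      intro fr hfr
      obtain ⟨h1, h2, h3⟩ := mem_mkFrames _ _ _ hfr
      have hchild : Mfn fr.1 fr.2.1 < Mfn s v := by
        rw [h2]
        exact M_child hInv h1 h3
      calc nuF (Mfn fr.1 fr.2.1) ≤ nuF (Mfn s v - 1) := nuF_mono (by omega)
        _ = Mfn s v ^ (Mfn s v - 1) := by
              unfold nuF
              congr 1
              omega
    have hsum : ((mkFrames v (split_by_val s v) p).map (fun fr => nuF (Mfn fr.1 fr.2.1))).sum
        ≤ (mkFrames v (split_by_val s v) p).length * (Mfn s v ^ (Mfn s v - 1)) := by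
      have := List.sum_le_card_nsmul ((mkFrames v (split_by_val s v) p).map (fun fr => nuF (Mfn fr.1 fr.2.1)))
        (Mfn s v ^ (Mfn s v - 1)) (by
          intro x hx
          obtain ⟨fr, hfr, hfx⟩ := List.mem_map.mp hx
          rw [← hfx]
          exact hbound fr hfr)
      simpa [smul_eq_mul] using this
    have hcount : (mkFrames v (split_by_val s v) p).length ≤ Mfn s v - 2 :=
      le_trans (length_mkFrames _ _) (le_trans (split_length_le hs) hslen)
    have hX : 1 ≤ Mfn s v ^ (Mfn s v - 1) := Nat.one_le_pow _ _ (by omega)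
    have step1 : 1 + ((mkFrames v (split_by_val s v) p).map (fun fr => nuF (Mfn fr.1 fr.2.1))).sum
        ≤ 1 + (Mfn s v - 2) * (Mfn s v ^ (Mfn s v - 1)) := by
      have := le_trans hsum (Nat.mul_le_mul_right _ hcount)
      omega
    have step2 : 1 + (Mfn s v - 2) * (Mfn s v ^ (Mfn s v - 1)) ≤ Mfn s v ^ Mfn s v := by
      have hpow : Mfn s v ^ Mfn s v = Mfn s v * Mfn s v ^ (Mfn s v - 1) := by
        rw [← pow_succ']
        congr 1
        omega
      rw [hpow]
      have hmul : (Mfn s v - 2) * (Mfn s v ^ (Mfn s v - 1)) + 2 * (Mfn s v ^ (Mfn s v - 1))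
          = Mfn s v * Mfn s v ^ (Mfn s v - 1) := by
        rw [← add_mul]
        congr 1
        omega
      omega
    have step3 : Mfn s v ^ Mfn s v ≤ nuF (Mfn s v) := by
      unfold nuF
      exact Nat.pow_le_pow_left (by omega) _
    omega

lemma rgdA_fuel (n : Nat) : ∀ (f f' : Nat) (s : List Int) (v : Int) (d : List Int) (p q : Int),
    Inv_rgd s v → Mfn s v ≤ n → Mfn s v ≤ f → Mfn s v ≤ f' →
    rgdA f s v d p q = rgdA f' s v d p q := by
  induction n using Nat.strong_induction_on with
  | _ n IH =>
    intro f f' s v d p q hInv hn hf hf'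
    have hM2 := Mfn_ge2 s v
    obtain ⟨f1, rfl⟩ : ∃ f1, f = f1 + 1 := ⟨f - 1, by omega⟩
    obtain ⟨f2, rfl⟩ : ∃ f2, f' = f2 + 1 := ⟨f' - 1, by omega⟩
    simp only [rgdA]
    congr 1
    apply PySem.List.foldl_congr_mem
    intro acc sp hsp
    dsimp only
    by_cases hl : (1 : Int) < PySem.List.len sp
    · rw [if_pos hl, if_pos hl]
      have hlen : 1 < sp.length := by
        rw [PySem.List.len_eq] at hl
        exact_mod_cast hl
      have hchild : Mfn sp (v + 1) < Mfn s v := M_child hInv hsp hlen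
      have := IH (Mfn sp (v + 1)) (by omega) f1 f2 sp (v + 1) acc.2 acc.1
        (acc.1 + PySem.List.len sp) (Inv_rgd_child hInv hsp hlen) le_rfl (by omega) (by omega)
      rw [this]
    · rw [if_neg hl, if_neg hl]

lemma foldA_frames (φ : List Int → Int → List Int → Int → Int → List Int) (v : Int) :
    ∀ (cs : List (List Int)) (p : Int) (dur : List Int),
      (cs.foldl
        (fun st sp =>
          (st.1 + PySem.List.len sp,
            if 1 < PySem.List.len sp then φ sp (v + 1) st.2 st.1 (st.1 + PySem.List.len sp) else st.2))
        (p, dur)).2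
      = (mkFrames v cs p).foldl (fun d fr => φ fr.1 fr.2.1 d fr.2.2.1 fr.2.2.2) dur := by
  intro cs
  induction cs with
  | nil => intro p dur; simp [mkFrames]
  | cons sp cs ih =>
      intro p dur
      simp only [List.foldl_cons, mkFrames, List.foldl_append]
      by_cases hl : (1 : Int) < PySem.List.len sp
      · rw [if_pos hl, if_pos hl]
        simp only [List.foldl_cons, List.foldl_nil]
        exact ih _ _
      · rw [if_neg hl, if_neg hl]
        simp only [List.foldl_nil]
        exact ih _ _

lemma stack_eq : ∀ (fB : Nat) (frames : List (List Int × Int × Int × Int)) (dur : List Int),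
    (∀ fr ∈ frames, Inv_rgd fr.1 fr.2.1) →
    ((frames.map (fun fr => nuF (Mfn fr.1 fr.2.1))).sum ≤ fB) →
    rgdB fB frames dur =
      frames.foldl (fun d fr => rgdA (Mfn fr.1 fr.2.1) fr.1 fr.2.1 d fr.2.2.1 fr.2.2.2) dur := by
  intro fB
  induction fB with
  | zero =>
      intro frames dur H Hf
      cases frames with
      | nil => rfl
      | cons fr rest =>
          exfalso
          have hpos : 0 < nuF (Mfn fr.1 fr.2.1) := by unfold nuF; positivity
          simp only [List.map_cons, List.sum_cons] at Hf
          omega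
  | succ fB ih =>
      intro frames dur H Hf
      cases frames with
      | nil => rfl
      | cons fr rest =>
          obtain ⟨s, v, p, q⟩ := fr
          have hInv : Inv_rgd s v := H (s, v, p, q) (by simp)
          have hM2 := Mfn_ge2 s v
          simp only [rgdB]
          have Hc : ∀ fr' ∈ mkFrames v (split_by_val s v) p, Inv_rgd fr'.1 fr'.2.1 := by
            intro fr' h
            obtain ⟨h1, h2, h3⟩ := mem_mkFrames _ _ _ h
            rw [h2]
            exact Inv_rgd_child hInv h1 h3
          have Hsum : ((mkFrames v (split_by_val s v) p ++ rest).map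
              (fun fr => nuF (Mfn fr.1 fr.2.1))).sum ≤ fB := by
            have h1 := nu_rec p hInv
            simp only [List.map_append, List.sum_append]
            simp only [List.map_cons, List.sum_cons] at Hf
            omega
          rw [ih _ _ (by
            intro fr' h
            rcases List.mem_append.mp h with h | h
            · exact Hc _ h
            · exact H fr' (List.mem_cons_of_mem _ h)) Hsum]
          rw [List.foldl_append, List.foldl_cons]
          congr 1
          obtain ⟨k, hk⟩ : ∃ k, Mfn s v = k + 1 := ⟨Mfn s v - 1, by omega⟩
          show _ = rgdA (Mfn s v) s v dur p q
          rw [hk]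
          simp only [rgdA]
          rw [PySem.List.foldl_congr_mem (split_by_val s v) _
            (fun st sp =>
              (st.1 + PySem.List.len sp,
                if 1 < PySem.List.len sp then
                  rgdA (Mfn sp (v + 1)) sp (v + 1) st.2 st.1 (st.1 + PySem.List.len sp)
                else st.2)) _ (by
              intro acc sp hsp
              dsimp only
              by_cases hl : (1 : Int) < PySem.List.len sp
              · rw [if_pos hl, if_pos hl]
                have hlen : 1 < sp.length := by
                  rw [PySem.List.len_eq] at hl
                  exact_mod_cast hl
                have hchild : Mfn sp (v + 1) < Mfn s v := M_child hInv hsp hlen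
                have := rgdA_fuel (Mfn sp (v + 1)) k (Mfn sp (v + 1)) sp (v + 1) acc.2 acc.1
                  (acc.1 + PySem.List.len sp) (Inv_rgd_child hInv hsp hlen) le_rfl (by omega) le_rfl
                rw [this]
              · rw [if_neg hl, if_neg hl])]
          exact (foldA_frames (fun s' v' d' p' q' => rgdA (Mfn s' v') s' v' d' p' q') v
            (split_by_val s v) p _).symm

-- ===== VERDICT (by name: the statement is the Claim_ definition above) =====
theorem recursive_get_duration_spec : Claim_equal_recursive_get_duration := by
  intro s v d p q _hDom hPre
  unfold Spec_recursive_get_duration recursive_get_duration recursive_get_duration_alt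
  have hInv : Inv_rgd s v := hPre.1
  have := stack_eq ((Mfn s v + 1) ^ Mfn s v) [(s, v, p, q)] d
    (by intro fr hfr; simp at hfr; subst hfr; exact hInv)
    (by simp [nuF])
  simp [List.foldl] at this
  rw [this]
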